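-- pv_equiv track=rewrite | github.com/PhoenixBeaudry/god-personal | core/utils.py | _strip_url_credentials
-- ===== SOURCE A (Python) =====
-- def _strip_url_credentials(text: str) -> str:
--     parts = text.split()
--     sanitized_parts: list[str] = []
--     for part in parts:
--         if "://" in part and "@" in part:
--             scheme, rest = part.split("://", 1)
--             if "@" in rest:
--                 rest = rest.split("@", 1)[1]
--                 sanitized_parts.append(f"{scheme}://{rest}")
--                 continue
--         sanitized_parts.append(part)
--     return " ".join(sanitized_parts)
-- ===== SOURCE B (Python) =====
-- def _strip_url_credentials(text: str) -> str:
--     # Stage 1: normalize whitespace once.  Stage 2: scan the normalized string as a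
--     # whole, jumping from one "://" to the end of its token, instead of mapping a
--     # parser over the token list.
--     s = " ".join(text.split())
--     out = []
--     while True:
--         p = s.find("://")
--         if p == -1:
--             out.append(s)
--             return "".join(out)
--         sp = s.find(" ", p + 3)
--         end = len(s) if sp == -1 else sp
--         q = s.find("@", p + 3, end)
--         if q == -1:
--             out.append(s[:end])
--         else:
--             out.append(s[:p + 3])
--             out.append(s[q + 1:end])
--         s = s[end:]
-- ===== Notes on version B (the rewrite author's own statement) =====
-- stated objective: alternative
-- what changed: A maps a manual parser (membership tests + split('://',1) + split('@',1) + f-string rebuild) over the whitespace-split token list and rejoins; B first normalizes whitespace once with ' '.join(text.split()) and then runs a single cursor-style scan over the whole normalized string, repeatedly locating the next '://', the end of its token (next space) and the first '@' in between, emitting spliced segments and jumping past each processed token.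
import Mathlib
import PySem

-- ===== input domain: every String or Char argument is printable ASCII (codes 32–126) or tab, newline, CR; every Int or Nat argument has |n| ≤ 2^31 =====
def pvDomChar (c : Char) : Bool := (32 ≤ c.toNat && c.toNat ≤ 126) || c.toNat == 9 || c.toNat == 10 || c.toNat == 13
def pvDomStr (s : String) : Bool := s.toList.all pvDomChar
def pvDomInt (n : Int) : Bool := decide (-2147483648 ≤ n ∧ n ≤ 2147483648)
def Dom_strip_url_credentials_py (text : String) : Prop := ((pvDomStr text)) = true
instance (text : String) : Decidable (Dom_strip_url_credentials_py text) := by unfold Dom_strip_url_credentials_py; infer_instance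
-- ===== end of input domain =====

-- B normalizes whitespace once and then scans the normalized string as a whole, jumping from
-- each "://" to the end of its token, instead of mapping a manual parser over the token list
-- (objective: alternative decomposition, same cost).

-- ===== PORT A =====
-- per-token body of A's loop, on code points.  The two `| _ => part` arms are Python's unreachable
-- ValueError/IndexError of the destructuring / [1]: under the guards each split has exactly 2 pieces.
def pvSanA (part : List Char) : List Char :=
  if PySem.Chars.isIn "://".toList part && PySem.Chars.isIn "@".toList part then
    match PySem.Chars.splitOnMax part "://".toList 1 with
    | scheme :: rest :: _ =>
      if PySem.Chars.isIn "@".toList rest then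
        match PySem.Chars.splitOnMax rest "@".toList 1 with
        | _ :: rest' :: _ => scheme ++ "://".toList ++ rest'   -- f"{scheme}://{rest}"
        | _ => part
      else part
    | _ => part
  else part

def strip_url_credentials_py (text : String) : String :=
  let parts := PySem.Str.split₀ text
  let sanitized := parts.foldl (fun acc part => acc ++ [String.ofList (pvSanA part.toList)]) []
  PySem.Str.join " " sanitized

-- ===== PORT B =====
-- termination fact for the scan loop: each iteration drops at least the matched "://"
theorem pvB_dec (s : List Char) (hp : ¬ PySem.Chars.find s "://".toList = -1) :
    (PySem.Chars.slice s (some (if PySem.Chars.findFrom s " ".toList (PySem.Chars.find s "://".toList + 3) = -1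
        then (s.length : Int) else PySem.Chars.findFrom s " ".toList (PySem.Chars.find s "://".toList + 3))) none).length < s.length := by
  have hnn : 0 ≤ PySem.Chars.find s "://".toList := by
    have := PySem.Chars.neg_one_le_find s "://".toList; omega
  obtain ⟨hpre, -⟩ := PySem.Chars.find_spec (s := s) (sub := "://".toList) hnn
  have hlen : (PySem.Chars.find s "://".toList).toNat + 3 ≤ s.length := by
    have h1 := hpre.length_le
    rw [List.length_drop] at h1
    have h2 := PySem.Chars.find_le_length s "://".toList
    have h3 : ("://".toList).length = 3 := by decide
    omega
  by_cases hsp : PySem.Chars.findFrom s " ".toList (PySem.Chars.find s "://".toList + 3) = -1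
  · rw [if_pos hsp, PySem.Chars.slice_eq_listSlice, PySem.List.slice_from _ (by positivity)]
    simp only [Int.toNat_natCast, List.length_drop]
    omega
  · rw [if_neg hsp]
    have hcast : PySem.Chars.find s "://".toList + 3 =
        (((PySem.Chars.find s "://".toList).toNat + 3 : Nat) : Int) := by omega
    rw [hcast] at hsp ⊢
    obtain ⟨hge, hpre2, -⟩ := PySem.Chars.findFrom_natCast_spec s " ".toList _ hlen hsp
    have hle := PySem.Chars.find_le_length s " ".toList  -- unused guard; bound below
    have hlen2 : (PySem.Chars.findFrom s " ".toList
        (((PySem.Chars.find s "://".toList).toNat + 3 : Nat) : Int)).toNat < s.length := by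
      have := hpre2.length_le
      rw [List.length_drop] at this
      have h3 : (" ".toList).length = 1 := by decide
      omega
    rw [PySem.Chars.slice_eq_listSlice, PySem.List.slice_from _ (by omega)]
    simp only [List.length_drop]
    omega

-- Source B's while loop as structural recursion on the remaining string s (out-accumulation = the
-- appended pieces).  s.find("@", p+3, end) is PySem.Chars.findFrom with its end? slice bound.
def pvGoB (s : List Char) : List Char :=
  let p := PySem.Chars.find s "://".toList
  if hp : p = -1 then s
  else
    let sp := PySem.Chars.findFrom s " ".toList (p + 3)
    let endi : Int := if sp = -1 then (s.length : Int) else sp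
    let q := PySem.Chars.findFrom s "@".toList (p + 3) (some endi)
    (if q = -1 then PySem.Chars.slice s none (some endi)
     else PySem.Chars.slice s none (some (p + 3)) ++ PySem.Chars.slice s (some (q + 1)) (some endi))
    ++ pvGoB (PySem.Chars.slice s (some endi) none)
termination_by s.length
decreasing_by exact pvB_dec s hp

def strip_url_credentials_py_alt (text : String) : String :=
  let s := PySem.Str.join " " (PySem.Str.split₀ text)
  String.ofList (pvGoB s.toList)

-- ===== PRECONDITION & SPEC =====
def Spec_strip_url_credentials_py (text : String) (out : String) : Prop := out = strip_url_credentials_py_alt text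
instance (text : String) (out : String) : Decidable (Spec_strip_url_credentials_py text out) := by unfold Spec_strip_url_credentials_py; infer_instance

-- ===== CLAIM (what is proved, stated in full; the proofs are below) =====
def Claim_equal_strip_url_credentials_py : Prop := ∀ (text : String), Dom_strip_url_credentials_py text → Spec_strip_url_credentials_py text (strip_url_credentials_py text)

-- ===== LEMMAS AND PROOFS =====

-- the common per-token value: first "://", then first "@" after it, spliced out
def pvSanB (part : List Char) : List Char :=
  let i := PySem.Chars.find part "://".toList
  if i = -1 then part
  else
    let j := PySem.Chars.findFrom part "@".toList (i + 3)
    if j = -1 then part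
    else PySem.Chars.slice part none (some (i + 3)) ++ PySem.Chars.slice part (some (j + 1)) none

def pvTok (t : List Char) : Prop := t ≠ [] ∧ ∀ c ∈ t, PySem.Chars.isspace c = false

theorem pvGo_zero (sep : List Char) (fuel : Nat) (l cur : List Char) (acc : List (List Char)) :
    PySem.Chars.splitOnMax.go sep fuel 0 l cur acc = ((cur.reverse ++ l) :: acc).reverse := by
  cases fuel with
  | zero => rfl
  | succ f => cases l with
    | nil => simp [PySem.Chars.splitOnMax.go]
    | cons c rest => simp [PySem.Chars.splitOnMax.go]

theorem pvFind_eq (l sub : List Char) (m : Nat) (h1 : sub <+: l.drop m)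
    (h2 : ∀ i < m, ¬ sub <+: l.drop i) : PySem.Chars.find l sub = (m : Int) := by
  have hin : PySem.Chars.isIn sub l = true := by
    rw [← PySem.Chars.exists_prefix_drop_iff_isIn]; exact ⟨m, h1⟩
  have hnn : 0 ≤ PySem.Chars.find l sub := by
    rw [PySem.Chars.find_nonneg_iff]; exact (PySem.Chars.isIn_iff_infix _ _).mp hin
  obtain ⟨hp, hmin⟩ := PySem.Chars.find_spec (s := l) (sub := sub) hnn
  have hkm : (PySem.Chars.find l sub).toNat = m := by
    rcases Nat.lt_trichotomy (PySem.Chars.find l sub).toNat m with h | h | h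
    · exact absurd hp (h2 _ h)
    · exact h
    · exact absurd h1 (hmin m h)
  omega

theorem pvGo_one_pos (sep : List Char) (hsep : sep ≠ []) (fuel : Nat) :
    ∀ (l cur : List Char) (acc : List (List Char)), l.length < fuel → sep <:+: l →
    PySem.Chars.splitOnMax.go sep fuel 1 l cur acc =
      acc.reverse ++ [cur.reverse ++ l.take (PySem.Chars.find l sep).toNat,
        l.drop ((PySem.Chars.find l sep).toNat + sep.length)] := by
  induction fuel with
  | zero => intro l cur acc h _; omega
  | succ f ih =>
    intro l cur acc h hinf
    cases l with
    | nil => exact absurd (List.eq_nil_of_infix_nil hinf) hsep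
    | cons c rest =>
      by_cases hpre : sep <+: (c :: rest)
      · have hprefb : sep.isPrefixOf (c :: rest) = true := List.isPrefixOf_iff_prefix.mpr hpre
        have hfind : PySem.Chars.find (c :: rest) sep = (0 : Int) := by
          apply pvFind_eq _ _ 0 (by simpa using hpre)
          intro i hi; omega
        have step : PySem.Chars.splitOnMax.go sep (f + 1) 1 (c :: rest) cur acc =
            PySem.Chars.splitOnMax.go sep 0 0 (List.drop sep.length (c :: rest)) []
              (cur.reverse :: acc) := by
          simp [PySem.Chars.splitOnMax.go, hprefb, pvGo_zero]
        rw [step, pvGo_zero, hfind]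
        simp
      · have hrest : sep <:+: rest := by
          rcases List.infix_cons_iff.mp hinf with h0 | h0
          · exact absurd h0 hpre
          · exact h0
        have hprefb : sep.isPrefixOf (c :: rest) = false := by
          rw [← Bool.not_eq_true]; intro hx; exact hpre (List.isPrefixOf_iff_prefix.mp hx)
        have step : PySem.Chars.splitOnMax.go sep (f + 1) 1 (c :: rest) cur acc =
            PySem.Chars.splitOnMax.go sep f 1 rest (c :: cur) acc := by
          simp [PySem.Chars.splitOnMax.go, hprefb]
        rw [step, ih rest (c :: cur) acc (by simpa using Nat.lt_of_succ_lt_succ h) hrest]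
        have hnn : 0 ≤ PySem.Chars.find rest sep := by
          rw [PySem.Chars.find_nonneg_iff]; exact hrest
        obtain ⟨hp, hmin⟩ := PySem.Chars.find_spec (s := rest) (sub := sep) hnn
        have hfind : PySem.Chars.find (c :: rest) sep =
            (((PySem.Chars.find rest sep).toNat + 1 : Nat) : Int) := by
          apply pvFind_eq _ _ ((PySem.Chars.find rest sep).toNat + 1) (by simpa using hp)
          intro i hi
          cases i with
          | zero => simpa using hpre
          | succ i' => simpa using hmin i' (by omega)
        rw [hfind]
        have hn : ((((PySem.Chars.find rest sep).toNat + 1 : Nat) : Int)).toNat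
            = (PySem.Chars.find rest sep).toNat + 1 := Int.toNat_natCast _
        rw [hn]
        have e2 : List.drop ((PySem.Chars.find rest sep).toNat + sep.length) rest
            = List.drop ((PySem.Chars.find rest sep).toNat + 1 + sep.length) (c :: rest) := by
          have hx : (PySem.Chars.find rest sep).toNat + 1 + sep.length
              = ((PySem.Chars.find rest sep).toNat + sep.length) + 1 := by omega
          rw [hx, List.drop_succ_cons]
        rw [← e2]
        simp [List.take_succ_cons]

theorem pvSplit1_pos (l sep : List Char) (hsep : sep ≠ []) (h : sep <:+: l) :
    PySem.Chars.splitOnMax l sep 1 =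
      [l.take (PySem.Chars.find l sep).toNat,
       l.drop ((PySem.Chars.find l sep).toNat + sep.length)] := by
  unfold PySem.Chars.splitOnMax
  rw [if_neg (by omega)]
  simp only [Int.toNat_one]
  rw [pvGo_one_pos sep hsep (l.length + 1) l [] [] (by omega) h]
  simp

theorem pvSan_eq (cs : List Char) : pvSanA cs = pvSanB cs := by
  by_cases hS : "://".toList <:+: cs
  · have hnn : 0 ≤ PySem.Chars.find cs "://".toList :=
      (PySem.Chars.find_nonneg_iff _ _).mpr hS
    obtain ⟨hp, hmin⟩ := PySem.Chars.find_spec (s := cs) (sub := "://".toList) hnn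
    have hisinS : PySem.Chars.isIn "://".toList cs = true :=
      (PySem.Chars.isIn_iff_infix _ _).mpr hS
    have hlen : (PySem.Chars.find cs "://".toList).toNat + 3 ≤ cs.length := by
      have h1 := hp.length_le
      have h2 := PySem.Chars.find_le_length cs "://".toList
      rw [List.length_drop] at h1
      have h3 : ("://".toList).length = 3 := by decide
      omega
    have hi3 : PySem.Chars.find cs "://".toList + 3 =
        (((PySem.Chars.find cs "://".toList).toNat + 3 : Nat) : Int) := by omega
    by_cases hat : "@".toList <:+: cs.drop ((PySem.Chars.find cs "://".toList).toNat + 3)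
    · -- credentials present: both rebuild
      have hnn2 : 0 ≤ PySem.Chars.find (cs.drop ((PySem.Chars.find cs "://".toList).toNat + 3)) "@".toList :=
        (PySem.Chars.find_nonneg_iff _ _).mpr hat
      have hisinAll : PySem.Chars.isIn "@".toList cs = true := by
        rw [PySem.Chars.isIn_iff_infix]
        exact hat.trans (List.drop_suffix _ _).isInfix
      have hisinRest : PySem.Chars.isIn "@".toList (cs.drop ((PySem.Chars.find cs "://".toList).toNat + 3)) = true :=
        (PySem.Chars.isIn_iff_infix _ _).mpr hat
      have hff : PySem.Chars.findFrom cs "@".toList (PySem.Chars.find cs "://".toList + 3) =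
          (((PySem.Chars.find cs "://".toList).toNat + 3 : Nat) : Int) +
            PySem.Chars.find (cs.drop ((PySem.Chars.find cs "://".toList).toNat + 3)) "@".toList := by
        rw [hi3, PySem.Chars.findFrom_natCast cs "@".toList _ hlen]
        rw [if_neg (by
          rw [PySem.Chars.find_eq_neg_one_iff]
          simpa using hat)]
      simp only [pvSanA, pvSanB, hisinS, hisinAll, Bool.and_self, if_true]
      rw [pvSplit1_pos cs "://".toList (by decide) hS]
      simp only [show ("://".toList).length = 3 from rfl, hisinRest, if_true]
      rw [pvSplit1_pos _ "@".toList (by decide) hat]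
      simp only [show ("@".toList).length = 1 from rfl]
      rw [hff]
      rw [if_neg (by omega), if_neg (by omega)]
      rw [PySem.Chars.slice_eq_listSlice, PySem.Chars.slice_eq_listSlice]
      rw [hi3, PySem.List.slice_to cs (by positivity)]
      have hj1 : (((PySem.Chars.find cs "://".toList).toNat + 3 : Nat) : Int) +
          PySem.Chars.find (cs.drop ((PySem.Chars.find cs "://".toList).toNat + 3)) "@".toList + 1 =
          (((PySem.Chars.find cs "://".toList).toNat + 3 +
            ((PySem.Chars.find (cs.drop ((PySem.Chars.find cs "://".toList).toNat + 3)) "@".toList).toNat + 1) : Nat) : Int) := by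
        omega
      rw [hj1, PySem.List.slice_from cs (by positivity)]
      rw [Int.toNat_natCast, Int.toNat_natCast]
      -- A: take n ++ "://" ++ drop (k+1) rest  =  B: take (n+3) ++ drop (n+3+(k+1))
      have htake : cs.take ((PySem.Chars.find cs "://".toList).toNat + 3) =
          cs.take (PySem.Chars.find cs "://".toList).toNat ++ "://".toList := by
        rw [List.take_add]
        congr 1
        have := List.prefix_iff_eq_take.mp hp
        simpa using this.symm
      have hdrop : cs.drop ((PySem.Chars.find cs "://".toList).toNat + 3 +
            ((PySem.Chars.find (cs.drop ((PySem.Chars.find cs "://".toList).toNat + 3)) "@".toList).toNat + 1)) =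
          (cs.drop ((PySem.Chars.find cs "://".toList).toNat + 3)).drop
            ((PySem.Chars.find (cs.drop ((PySem.Chars.find cs "://".toList).toNat + 3)) "@".toList).toNat + 1) := by
        rw [List.drop_drop]
      rw [htake, hdrop]
    · -- '@' absent after '://': both keep the token
      have hff : PySem.Chars.findFrom cs "@".toList (PySem.Chars.find cs "://".toList + 3) = -1 := by
        rw [hi3, PySem.Chars.findFrom_natCast cs "@".toList _ hlen]
        rw [if_pos (by rw [PySem.Chars.find_eq_neg_one_iff]; simpa using hat)]
      have hisinRest : PySem.Chars.isIn "@".toList (cs.drop ((PySem.Chars.find cs "://".toList).toNat + 3)) = false :=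
        (PySem.Chars.isIn_eq_false_iff _ _).mpr hat
      have hBne : ¬ (PySem.Chars.find cs "://".toList = -1) := by omega
      simp only [pvSanA, pvSanB]
      rw [if_neg hBne, if_pos hff]
      by_cases hAll : PySem.Chars.isIn "@".toList cs = true
      · rw [if_pos (show (PySem.Chars.isIn "://".toList cs && PySem.Chars.isIn "@".toList cs) = true by rw [hisinS, hAll]; rfl)]
        rw [pvSplit1_pos cs "://".toList (by decide) hS]
        simp only [show ("://".toList).length = 3 from rfl, hisinRest]
        simp
      · simp only [Bool.not_eq_true] at hAll
        have hg : (PySem.Chars.isIn "://".toList cs && PySem.Chars.isIn "@".toList cs) = false := by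
          rw [hAll, Bool.and_false]
        rw [if_neg (show ¬ ((PySem.Chars.isIn "://".toList cs && PySem.Chars.isIn "@".toList cs) = true) from fun h => by rw [hg] at h; cases h)]
  · have hfind : PySem.Chars.find cs "://".toList = -1 :=
      (PySem.Chars.find_eq_neg_one_iff _ _).mpr hS
    have hisin : PySem.Chars.isIn "://".toList cs = false :=
      (PySem.Chars.isIn_eq_false_iff _ _).mpr hS
    have hg : (PySem.Chars.isIn "://".toList cs && PySem.Chars.isIn "@".toList cs) = false := by
      rw [hisin, Bool.false_and]
    simp only [pvSanA, pvSanB]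
    rw [if_neg (show ¬ ((PySem.Chars.isIn "://".toList cs && PySem.Chars.isIn "@".toList cs) = true) from fun h => by rw [hg] at h; cases h), if_pos hfind]

-- ===== VERDICT support: B-side scan lemmas =====

theorem pvPrefixLeft (sub a b : List Char) (h : sub <+: a ++ b) (hle : sub.length ≤ a.length) :
    sub <+: a := by
  have h1 := List.prefix_iff_eq_take.mp h
  rw [List.take_append, Nat.sub_eq_zero_of_le hle, List.take_zero, List.append_nil] at h1
  exact List.prefix_iff_eq_take.mpr h1

-- where an occurrence of "://" inside t ++ ' ' :: u can sit: wholly in t or wholly in u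
theorem pvOccSplit (t u : List Char) (i : Nat) (h : "://".toList <+: (t ++ ' ' :: u).drop i) :
    ("://".toList <+: t.drop i ∧ i + 3 ≤ t.length) ∨
      (t.length + 1 ≤ i ∧ "://".toList <+: u.drop (i - t.length - 1)) := by
  by_cases h1 : i + 3 ≤ t.length
  · left
    refine ⟨?_, h1⟩
    rw [List.drop_append, Nat.sub_eq_zero_of_le (by omega), List.drop_zero] at h
    exact pvPrefixLeft _ _ _ h (by simp [List.length_drop]; omega)
  · by_cases h2 : t.length + 1 ≤ i
    · right
      refine ⟨h2, ?_⟩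
      have hs : (t ++ ' ' :: u) = (t ++ [' ']) ++ u := by simp
      have hlen : (t ++ [' ']).length = t.length + 1 := by simp
      have hi : i = (t ++ [' ']).length + (i - t.length - 1) := by simp; omega
      rw [hs, hi, List.drop_length_add_append] at h
      exact h
    · -- the occurrence would cover the separating space
      exfalso
      have hit : i ≤ t.length := by omega
      obtain ⟨r, hr⟩ := h
      have hlt : t.length - i < ("://".toList ++ r).length := by
        simp [List.length_append]
        have : ("://".toList).length = 3 := by decide
        omega
      have hdl : t.length - i < ((t ++ ' ' :: u).drop i).length := by
        simp [List.length_drop]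
        omega
      have he : ((t ++ ' ' :: u).drop i)[t.length - i]'hdl = ' ' := by
        rw [List.getElem_drop]
        have : i + (t.length - i) = t.length := by omega
        simp only [this]
        rw [List.getElem_append_right (by omega)]
        simp
      have he2 : ("://".toList ++ r)[t.length - i]'hlt = ' ' :=
        (List.getElem_of_eq hr hlt).trans he
      have h3 : t.length - i < 3 := by omega
      have hne : ∀ (k : Nat) (hk : k < ("://".toList ++ r).length), k < 3 →
          ("://".toList ++ r)[k]'hk ≠ ' ' := by
        intro k hk hk3 hEq
        rw [List.getElem_append_left (by simpa using hk3)] at hEq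
        have hm : (' ' : Char) ∈ "://".toList := hEq ▸ List.getElem_mem _
        exact absurd hm (by decide)
      exact hne _ _ h3 he2

theorem pvNoUrl (t u : List Char) (hnt : ¬ "://".toList <:+: t) (hnu : ¬ "://".toList <:+: u) :
    ¬ "://".toList <:+: (t ++ ' ' :: u) := by
  intro h
  have hin := (PySem.Chars.isIn_iff_infix _ _).mpr h
  obtain ⟨i, hi⟩ := (PySem.Chars.exists_prefix_drop_iff_isIn _ _).mpr hin
  rcases pvOccSplit t u i hi with ⟨hp, -⟩ | ⟨-, hp⟩
  · exact hnt (hp.isInfix.trans (List.drop_suffix _ _).isInfix)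
  · exact hnu (hp.isInfix.trans (List.drop_suffix _ _).isInfix)

theorem pvFind_shift (t u : List Char) (hnt : ¬ "://".toList <:+: t)
    (hpu : "://".toList <:+: u) :
    PySem.Chars.find (t ++ ' ' :: u) "://".toList =
      ((t.length + 1 : Nat) : Int) + PySem.Chars.find u "://".toList := by
  have hnn : 0 ≤ PySem.Chars.find u "://".toList := (PySem.Chars.find_nonneg_iff _ _).mpr hpu
  obtain ⟨hp, hmin⟩ := PySem.Chars.find_spec (s := u) (sub := "://".toList) hnn
  have hfe : PySem.Chars.find (t ++ ' ' :: u) "://".toList =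
      ((t.length + 1 + (PySem.Chars.find u "://".toList).toNat : Nat) : Int) := by
    apply pvFind_eq
    · have hs : (t ++ ' ' :: u) = (t ++ [' ']) ++ u := by simp
      have hi : t.length + 1 + (PySem.Chars.find u "://".toList).toNat
          = (t ++ [' ']).length + (PySem.Chars.find u "://".toList).toNat := by simp
      rw [hs, hi, List.drop_length_add_append]
      exact hp
    · intro i hi hpre
      rcases pvOccSplit t u i hpre with ⟨hq, -⟩ | ⟨h2, hq⟩
      · exact hnt (hq.isInfix.trans (List.drop_suffix _ _).isInfix)
      · exact hmin (i - t.length - 1) (by omega) hq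
  rw [hfe]; omega

theorem pvFind_space (x u : List Char) (hx : ' ' ∉ x) :
    PySem.Chars.find (x ++ ' ' :: u) [' '] = (x.length : Int) := by
  apply pvFind_eq
  · rw [show x.length = x.length + 0 by omega]
    have hs : (x ++ ' ' :: u) = x ++ (' ' :: u) := rfl
    rw [List.drop_length_add_append]
    exact ⟨u, rfl⟩
  · intro i hi hpre
    obtain ⟨r, hr⟩ := hpre
    have h1 : ((x ++ ' ' :: u).drop i).head? = some ' ' := by rw [← hr]; rfl
    rw [List.head?_drop, List.getElem?_append_left (by omega)] at h1
    exact hx (List.mem_of_getElem? h1)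

theorem pvFind_head (t z : List Char) (h : "://".toList <:+: t) :
    PySem.Chars.find (t ++ z) "://".toList = PySem.Chars.find t "://".toList := by
  have hnn : 0 ≤ PySem.Chars.find t "://".toList := (PySem.Chars.find_nonneg_iff _ _).mpr h
  obtain ⟨hp, hmin⟩ := PySem.Chars.find_spec (s := t) (sub := "://".toList) hnn
  have hlen : (PySem.Chars.find t "://".toList).toNat + 3 ≤ t.length := by
    have h1 := hp.length_le
    rw [List.length_drop] at h1
    have h2 := PySem.Chars.find_le_length t "://".toList
    have h3 : ("://".toList).length = 3 := by decide
    omega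
  have hfe : PySem.Chars.find (t ++ z) "://".toList =
      (((PySem.Chars.find t "://".toList).toNat : Nat) : Int) := by
    apply pvFind_eq
    · rw [List.drop_append, Nat.sub_eq_zero_of_le (by omega), List.drop_zero]
      exact hp.trans (List.prefix_append _ _)
    · intro i hi hpre
      rw [List.drop_append, Nat.sub_eq_zero_of_le (by omega), List.drop_zero] at hpre
      have := pvPrefixLeft _ _ _ hpre (by
        have h3 : ("://".toList).length = 3 := by decide
        rw [h3, List.length_drop]; omega)
      exact hmin i hi this
  rw [hfe]; omega

theorem pvFindFromTo (s sub : List Char) (a b : Nat) (hb : b ≤ s.length) (hab : a ≤ b) :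
    PySem.Chars.findFrom s sub (a : Int) (some (b : Int)) =
      if PySem.Chars.find ((s.take b).drop a) sub = -1 then -1
      else (a : Int) + PySem.Chars.find ((s.take b).drop a) sub := by
  simp only [PySem.Chars.findFrom]
  have h1 : ¬ ((s.length : Int) < (b : Int)) := by exact_mod_cast not_lt.mpr hb
  have h2 : ¬ ((b : Int) < 0) := by omega
  have h2a : ¬ ((a : Int) < 0) := by omega
  have h3 : ¬ ((b : Int) < (a : Int)) := by exact_mod_cast not_lt.mpr hab
  rw [if_neg h1, if_neg h2, if_neg h2a, if_neg h3]
  simp only [Int.toNat_natCast]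

theorem pvGoB_nil : pvGoB [] = [] := by
  rw [pvGoB]
  rw [dif_pos (by decide)]

theorem pvNoSpace (t : List Char) (h : ∀ c ∈ t, PySem.Chars.isspace c = false) : ' ' ∉ t := by
  intro hmem
  have := h ' ' hmem
  simp [PySem.Chars.isspace] at this

theorem pvSanB_def (part : List Char) : pvSanB part =
    (if PySem.Chars.find part "://".toList = -1 then part
     else if PySem.Chars.findFrom part "@".toList (PySem.Chars.find part "://".toList + 3) = -1 then part
     else PySem.Chars.slice part none (some (PySem.Chars.find part "://".toList + 3)) ++
          PySem.Chars.slice part (some (PySem.Chars.findFrom part "@".toList (PySem.Chars.find part "://".toList + 3) + 1)) none) := rfl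

theorem pvGoB_pos (s : List Char) (e : Int) (h : ¬ PySem.Chars.find s "://".toList = -1)
    (he : e = if PySem.Chars.findFrom s " ".toList (PySem.Chars.find s "://".toList + 3) = -1
        then (s.length : Int) else PySem.Chars.findFrom s " ".toList (PySem.Chars.find s "://".toList + 3)) :
    pvGoB s =
      (if PySem.Chars.findFrom s "@".toList (PySem.Chars.find s "://".toList + 3) (some e) = -1
        then PySem.Chars.slice s none (some e)
        else PySem.Chars.slice s none (some (PySem.Chars.find s "://".toList + 3)) ++
          PySem.Chars.slice s (some (PySem.Chars.findFrom s "@".toList (PySem.Chars.find s "://".toList + 3) (some e) + 1)) (some e))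
      ++ pvGoB (PySem.Chars.slice s (some e) none) := by
  subst he
  rw [pvGoB, dif_neg h]

theorem pvConsAux (t u : List Char) (eu put : Nat)
    (hput : PySem.Chars.find u "://".toList = ((put : Nat) : Int))
    (hlenu : put + 3 ≤ u.length)
    (heu1 : put + 3 ≤ eu) (heu2 : eu ≤ u.length)
    (hfs : PySem.Chars.find (t ++ ' ' :: u) "://".toList = ((t.length + 1 + put : Nat) : Int))
    (hesS : ((t.length + 1 + eu : Nat) : Int) =
      if PySem.Chars.findFrom (t ++ ' ' :: u) " ".toList (PySem.Chars.find (t ++ ' ' :: u) "://".toList + 3) = -1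
      then ((t ++ ' ' :: u).length : Int)
      else PySem.Chars.findFrom (t ++ ' ' :: u) " ".toList (PySem.Chars.find (t ++ ' ' :: u) "://".toList + 3))
    (hesU : ((eu : Nat) : Int) =
      if PySem.Chars.findFrom u " ".toList (PySem.Chars.find u "://".toList + 3) = -1
      then (u.length : Int)
      else PySem.Chars.findFrom u " ".toList (PySem.Chars.find u "://".toList + 3)) :
    pvGoB (t ++ ' ' :: u) = t ++ ' ' :: pvGoB u := by
  have hlens : (t ++ ' ' :: u).length = t.length + 1 + u.length := by simp; omega
  have hdw : ∀ (w : List Char) (k : Nat), (t ++ ' ' :: w).drop (t.length + 1 + k) = w.drop k := by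
    intro w k
    have h1 : (t ++ ' ' :: w) = (t ++ [' ']) ++ w := by simp
    have h2 : t.length + 1 + k = (t ++ [' ']).length + k := by simp
    rw [h1, h2, List.drop_length_add_append]
  have htw : ∀ (w : List Char) (k : Nat), (t ++ ' ' :: w).take (t.length + 1 + k) = t ++ ' ' :: w.take k := by
    intro w k
    have h1 : (t ++ ' ' :: w) = (t ++ [' ']) ++ w := by simp
    have h2 : t.length + 1 + k = (t ++ [' ']).length + k := by simp
    rw [h1, h2, List.take_length_add_append]; simp
  rw [pvGoB_pos (t ++ ' ' :: u) _ (by rw [hfs]; omega) hesS]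
  rw [pvGoB_pos u _ (by rw [hput]; omega) hesU]
  have hcaS : PySem.Chars.find (t ++ ' ' :: u) "://".toList + 3 = ((t.length + 1 + (put + 3) : Nat) : Int) := by
    rw [hfs]; omega
  have hcaU : PySem.Chars.find u "://".toList + 3 = ((put + 3 : Nat) : Int) := by
    rw [hput]; omega
  have hqS : PySem.Chars.findFrom (t ++ ' ' :: u) "@".toList
      (PySem.Chars.find (t ++ ' ' :: u) "://".toList + 3) (some ((t.length + 1 + eu : Nat) : Int)) =
      if PySem.Chars.find ((u.take eu).drop (put + 3)) "@".toList = -1 then -1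
      else ((t.length + 1 + (put + 3) : Nat) : Int) +
        PySem.Chars.find ((u.take eu).drop (put + 3)) "@".toList := by
    rw [hcaS, pvFindFromTo _ _ _ _ (by omega) (by omega), htw u eu, hdw (u.take eu) (put + 3)]
  have hqU : PySem.Chars.findFrom u "@".toList
      (PySem.Chars.find u "://".toList + 3) (some ((eu : Nat) : Int)) =
      if PySem.Chars.find ((u.take eu).drop (put + 3)) "@".toList = -1 then -1
      else ((put + 3 : Nat) : Int) +
        PySem.Chars.find ((u.take eu).drop (put + 3)) "@".toList := by
    rw [hcaU, pvFindFromTo _ _ _ _ (by omega) (by omega)]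
  have htailS : PySem.Chars.slice (t ++ ' ' :: u) (some ((t.length + 1 + eu : Nat) : Int)) none = u.drop eu := by
    rw [PySem.Chars.slice_eq_listSlice, PySem.List.slice_from_natCast, hdw u eu]
  have htailU : PySem.Chars.slice u (some ((eu : Nat) : Int)) none = u.drop eu := by
    rw [PySem.Chars.slice_eq_listSlice, PySem.List.slice_from_natCast]
  by_cases hh : PySem.Chars.find ((u.take eu).drop (put + 3)) "@".toList = -1
  · rw [if_pos hh] at hqS hqU
    rw [hqS, hqU, if_pos rfl, if_pos rfl, htailS, htailU]
    rw [PySem.Chars.slice_eq_listSlice, PySem.List.slice_to_natCast, htw u eu,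
      PySem.Chars.slice_eq_listSlice, PySem.List.slice_to_natCast]
    simp only [List.cons_append, List.append_assoc]
  · have hfnn : 0 ≤ PySem.Chars.find ((u.take eu).drop (put + 3)) "@".toList := by
      have := PySem.Chars.neg_one_le_find ((u.take eu).drop (put + 3)) "@".toList
      omega
    have hbound : (PySem.Chars.find ((u.take eu).drop (put + 3)) "@".toList).toNat + 1 ≤ eu - (put + 3) := by
      obtain ⟨hp2, -⟩ := PySem.Chars.find_spec (s := (u.take eu).drop (put + 3)) (sub := "@".toList) hfnn
      have h1 := hp2.length_le
      rw [List.length_drop, List.length_drop, List.length_take] at h1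
      have h3 : ("@".toList).length = 1 := by decide
      omega
    rw [if_neg hh] at hqS hqU
    rw [hqS, hqU, if_neg (by omega), if_neg (by omega), htailS, htailU]
    have haddS : ((t.length + 1 + (put + 3) : Nat) : Int) +
        PySem.Chars.find ((u.take eu).drop (put + 3)) "@".toList + 1 =
        ((t.length + 1 + (put + 3 + ((PySem.Chars.find ((u.take eu).drop (put + 3)) "@".toList).toNat + 1)) : Nat) : Int) := by
      omega
    have haddU : ((put + 3 : Nat) : Int) +
        PySem.Chars.find ((u.take eu).drop (put + 3)) "@".toList + 1 =
        ((put + 3 + ((PySem.Chars.find ((u.take eu).drop (put + 3)) "@".toList).toNat + 1) : Nat) : Int) := by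
      omega
    rw [haddS, haddU, hcaS, hcaU]
    simp only [PySem.Chars.slice_eq_listSlice, PySem.List.slice_to_natCast, PySem.List.slice_natCast]
    rw [htw u (put + 3), hdw u (put + 3 + ((PySem.Chars.find ((u.take eu).drop (put + 3)) "@".toList).toNat + 1))]
    have hsub : t.length + 1 + eu - (t.length + 1 + (put + 3 +
        ((PySem.Chars.find ((u.take eu).drop (put + 3)) "@".toList).toNat + 1))) =
        eu - (put + 3 + ((PySem.Chars.find ((u.take eu).drop (put + 3)) "@".toList).toNat + 1)) := by
      omega
    rw [hsub]
    simp only [List.cons_append, List.append_assoc]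

theorem pvCons (t u : List Char) (hsp : ' ' ∉ t) (hnt : ¬ "://".toList <:+: t) :
    pvGoB (t ++ ' ' :: u) = t ++ ' ' :: pvGoB u := by
  by_cases hU : "://".toList <:+: u
  · have hnnu : 0 ≤ PySem.Chars.find u "://".toList := (PySem.Chars.find_nonneg_iff _ _).mpr hU
    obtain ⟨hpu, -⟩ := PySem.Chars.find_spec (s := u) (sub := "://".toList) hnnu
    have hlenu : (PySem.Chars.find u "://".toList).toNat + 3 ≤ u.length := by
      have h1 := hpu.length_le; rw [List.length_drop] at h1
      have h2 := PySem.Chars.find_le_length u "://".toList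
      have h3 : ("://".toList).length = 3 := by decide
      omega
    have hput : PySem.Chars.find u "://".toList = (((PySem.Chars.find u "://".toList).toNat : Nat) : Int) := by omega
    have hfs : PySem.Chars.find (t ++ ' ' :: u) "://".toList =
        ((t.length + 1 + (PySem.Chars.find u "://".toList).toNat : Nat) : Int) := by
      rw [pvFind_shift t u hnt hU, hput]; omega
    have hlens : (t ++ ' ' :: u).length = t.length + 1 + u.length := by simp; omega
    have hdw : ∀ (w : List Char) (k : Nat), (t ++ ' ' :: w).drop (t.length + 1 + k) = w.drop k := by
      intro w k
      have h1 : (t ++ ' ' :: w) = (t ++ [' ']) ++ w := by simp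
      have h2 : t.length + 1 + k = (t ++ [' ']).length + k := by simp
      rw [h1, h2, List.drop_length_add_append]
    have hcaS : PySem.Chars.find (t ++ ' ' :: u) "://".toList + 3 =
        ((t.length + 1 + ((PySem.Chars.find u "://".toList).toNat + 3) : Nat) : Int) := by
      rw [hfs]; omega
    have hcaU : PySem.Chars.find u "://".toList + 3 =
        (((PySem.Chars.find u "://".toList).toNat + 3 : Nat) : Int) := by omega
    have hspS : PySem.Chars.findFrom (t ++ ' ' :: u) " ".toList
        (PySem.Chars.find (t ++ ' ' :: u) "://".toList + 3) =
        if PySem.Chars.find (u.drop ((PySem.Chars.find u "://".toList).toNat + 3)) " ".toList = -1 then -1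
        else ((t.length + 1 + ((PySem.Chars.find u "://".toList).toNat + 3) : Nat) : Int) +
          PySem.Chars.find (u.drop ((PySem.Chars.find u "://".toList).toNat + 3)) " ".toList := by
      rw [hcaS, PySem.Chars.findFrom_natCast _ _ _ (by omega), hdw u _]
    have hspU : PySem.Chars.findFrom u " ".toList (PySem.Chars.find u "://".toList + 3) =
        if PySem.Chars.find (u.drop ((PySem.Chars.find u "://".toList).toNat + 3)) " ".toList = -1 then -1
        else (((PySem.Chars.find u "://".toList).toNat + 3 : Nat) : Int) +
          PySem.Chars.find (u.drop ((PySem.Chars.find u "://".toList).toNat + 3)) " ".toList := by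
      rw [hcaU, PySem.Chars.findFrom_natCast _ _ _ (by omega)]
    by_cases hg : PySem.Chars.find (u.drop ((PySem.Chars.find u "://".toList).toNat + 3)) " ".toList = -1
    · rw [if_pos hg] at hspS hspU
      exact pvConsAux t u u.length (PySem.Chars.find u "://".toList).toNat hput hlenu hlenu (le_refl _) hfs
        (by rw [hspS, if_pos rfl, hlens])
        (by rw [hspU, if_pos rfl])
    · have hgnn : 0 ≤ PySem.Chars.find (u.drop ((PySem.Chars.find u "://".toList).toNat + 3)) " ".toList := by
        have := PySem.Chars.neg_one_le_find (u.drop ((PySem.Chars.find u "://".toList).toNat + 3)) " ".toList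
        omega
      have hgb : (PySem.Chars.find (u.drop ((PySem.Chars.find u "://".toList).toNat + 3)) " ".toList).toNat + 1 ≤
          u.length - ((PySem.Chars.find u "://".toList).toNat + 3) := by
        obtain ⟨hp2, -⟩ := PySem.Chars.find_spec
          (s := u.drop ((PySem.Chars.find u "://".toList).toNat + 3)) (sub := " ".toList) hgnn
        have h1 := hp2.length_le
        rw [List.length_drop, List.length_drop] at h1
        have h3 : (" ".toList).length = 1 := by decide
        omega
      rw [if_neg hg] at hspS hspU
      exact pvConsAux t u ((PySem.Chars.find u "://".toList).toNat + 3 +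
          (PySem.Chars.find (u.drop ((PySem.Chars.find u "://".toList).toNat + 3)) " ".toList).toNat)
        (PySem.Chars.find u "://".toList).toNat hput hlenu (by omega) (by omega) hfs
        (by rw [hspS, if_neg (by omega)]; omega)
        (by rw [hspU, if_neg (by omega)]; omega)
  · have hfu : PySem.Chars.find u "://".toList = -1 := (PySem.Chars.find_eq_neg_one_iff _ _).mpr hU
    have hfS : PySem.Chars.find (t ++ ' ' :: u) "://".toList = -1 :=
      (PySem.Chars.find_eq_neg_one_iff _ _).mpr (pvNoUrl t u hnt hU)
    rw [pvGoB, dif_pos hfS]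
    conv_rhs => rw [pvGoB]
    rw [dif_pos hfu]

theorem pvLast (t : List Char) (htok : pvTok t) : pvGoB t = pvSanB t := by
  obtain ⟨hne, hns⟩ := htok
  have hsp : ' ' ∉ t := pvNoSpace t hns
  by_cases hS : "://".toList <:+: t
  · have hnn : 0 ≤ PySem.Chars.find t "://".toList := (PySem.Chars.find_nonneg_iff _ _).mpr hS
    obtain ⟨hp, hmin⟩ := PySem.Chars.find_spec (s := t) (sub := "://".toList) hnn
    have hlen : (PySem.Chars.find t "://".toList).toNat + 3 ≤ t.length := by
      have h1 := hp.length_le; rw [List.length_drop] at h1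
      have h2 := PySem.Chars.find_le_length t "://".toList
      have h3 : ("://".toList).length = 3 := by decide
      omega
    have hca : PySem.Chars.find t "://".toList + 3 = (((PySem.Chars.find t "://".toList).toNat + 3 : Nat) : Int) := by omega
    have hnosub : ¬ " ".toList <:+: t.drop ((PySem.Chars.find t "://".toList).toNat + 3) := by
      intro hinf
      obtain ⟨l₁, l₂, hab⟩ := hinf
      have hmem : ' ' ∈ t.drop ((PySem.Chars.find t "://".toList).toNat + 3) := by
        rw [← hab]; simp
      exact hsp ((List.drop_sublist _ _).mem hmem)
    have hspv : PySem.Chars.findFrom t " ".toList (PySem.Chars.find t "://".toList + 3) = -1 := by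
      rw [hca, PySem.Chars.findFrom_natCast t _ _ hlen, if_pos]
      exact (PySem.Chars.find_eq_neg_one_iff _ _).mpr hnosub
    have hine : ¬ (PySem.Chars.find t "://".toList = -1) := by omega
    rw [pvGoB_pos t ((t.length : Nat) : Int) hine (by rw [hspv, if_pos rfl])]
    have hq : PySem.Chars.findFrom t "@".toList (PySem.Chars.find t "://".toList + 3) (some ((t.length : Nat) : Int)) =
        if PySem.Chars.find (t.drop ((PySem.Chars.find t "://".toList).toNat + 3)) "@".toList = -1 then -1
        else (((PySem.Chars.find t "://".toList).toNat + 3 : Nat) : Int) +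
          PySem.Chars.find (t.drop ((PySem.Chars.find t "://".toList).toNat + 3)) "@".toList := by
      rw [hca, pvFindFromTo t _ _ _ (le_refl _) hlen]
      rw [List.take_length]
    have hj : PySem.Chars.findFrom t "@".toList (PySem.Chars.find t "://".toList + 3) =
        if PySem.Chars.find (t.drop ((PySem.Chars.find t "://".toList).toNat + 3)) "@".toList = -1 then -1
        else (((PySem.Chars.find t "://".toList).toNat + 3 : Nat) : Int) +
          PySem.Chars.find (t.drop ((PySem.Chars.find t "://".toList).toNat + 3)) "@".toList := by
      rw [hca, PySem.Chars.findFrom_natCast t _ _ hlen]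
    by_cases hat : PySem.Chars.find (t.drop ((PySem.Chars.find t "://".toList).toNat + 3)) "@".toList = -1
    · rw [if_pos hat] at hq hj
      rw [hq, pvSanB_def, if_neg hine, hj, if_pos rfl, if_pos rfl]
      simp only [PySem.Chars.slice_eq_listSlice, PySem.List.slice_to_natCast,
        PySem.List.slice_from_natCast, List.take_length, List.drop_length, pvGoB_nil,
        List.append_nil]
    · have hfnn : 0 ≤ PySem.Chars.find (t.drop ((PySem.Chars.find t "://".toList).toNat + 3)) "@".toList := by
        have := PySem.Chars.neg_one_le_find (t.drop ((PySem.Chars.find t "://".toList).toNat + 3)) "@".toList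
        omega
      rw [if_neg hat] at hq hj
      rw [hq, pvSanB_def, if_neg hine, hj, if_neg (by omega), if_neg (by omega)]
      have hadd : (((PySem.Chars.find t "://".toList).toNat + 3 : Nat) : Int) +
          PySem.Chars.find (t.drop ((PySem.Chars.find t "://".toList).toNat + 3)) "@".toList + 1 =
          (((PySem.Chars.find t "://".toList).toNat + 3 +
            ((PySem.Chars.find (t.drop ((PySem.Chars.find t "://".toList).toNat + 3)) "@".toList).toNat + 1) : Nat) : Int) := by
        omega
      rw [hadd, hca]
      simp only [PySem.Chars.slice_eq_listSlice, PySem.List.slice_to_natCast,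
        PySem.List.slice_from_natCast, PySem.List.slice_natCast, List.drop_length, pvGoB_nil,
        List.append_nil]
      have hdt : ∀ (k : Nat), List.take (t.length - k) (List.drop k t) = List.drop k t :=
        fun k => List.take_of_length_le (by rw [List.length_drop])
      rw [hdt]
  · have hfind : PySem.Chars.find t "://".toList = -1 := (PySem.Chars.find_eq_neg_one_iff _ _).mpr hS
    rw [pvGoB, dif_pos hfind, pvSanB_def, if_pos hfind]

theorem pvMid (t v : List Char) (htok : pvTok t) (hurl : "://".toList <:+: t) :
    pvGoB (t ++ ' ' :: v) = pvSanB t ++ pvGoB (' ' :: v) := by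
  obtain ⟨hne, hns⟩ := htok
  have hsp : ' ' ∉ t := pvNoSpace t hns
  have hnn : 0 ≤ PySem.Chars.find t "://".toList := (PySem.Chars.find_nonneg_iff _ _).mpr hurl
  obtain ⟨hp, hmin⟩ := PySem.Chars.find_spec (s := t) (sub := "://".toList) hnn
  have hlen : (PySem.Chars.find t "://".toList).toNat + 3 ≤ t.length := by
    have h1 := hp.length_le; rw [List.length_drop] at h1
    have h2 := PySem.Chars.find_le_length t "://".toList
    have h3 : ("://".toList).length = 3 := by decide
    omega
  have hfh : PySem.Chars.find (t ++ ' ' :: v) "://".toList = PySem.Chars.find t "://".toList :=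
    pvFind_head t (' ' :: v) hurl
  have hca : PySem.Chars.find t "://".toList + 3 = (((PySem.Chars.find t "://".toList).toNat + 3 : Nat) : Int) := by omega
  have hlens : (t ++ ' ' :: v).length = t.length + 1 + v.length := by simp; omega
  have hlenS : (PySem.Chars.find t "://".toList).toNat + 3 ≤ (t ++ ' ' :: v).length := by omega
  have hdropS : (t ++ ' ' :: v).drop ((PySem.Chars.find t "://".toList).toNat + 3) =
      t.drop ((PySem.Chars.find t "://".toList).toNat + 3) ++ ' ' :: v := by
    rw [List.drop_append, Nat.sub_eq_zero_of_le (by omega), List.drop_zero]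
  have hspv : PySem.Chars.findFrom (t ++ ' ' :: v) " ".toList
      (PySem.Chars.find (t ++ ' ' :: v) "://".toList + 3) = ((t.length : Nat) : Int) := by
    rw [hfh, hca, PySem.Chars.findFrom_natCast _ _ _ hlenS, hdropS]
    have hfsp := pvFind_space (t.drop ((PySem.Chars.find t "://".toList).toNat + 3)) v
      (fun hmem => hsp ((List.drop_sublist _ _).mem hmem))
    rw [show " ".toList = [' '] from rfl, hfsp]
    rw [if_neg (by omega), List.length_drop]
    omega
  have hine : ¬ (PySem.Chars.find (t ++ ' ' :: v) "://".toList = -1) := by rw [hfh]; omega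
  rw [pvGoB_pos (t ++ ' ' :: v) ((t.length : Nat) : Int) hine (by rw [hspv, if_neg (by omega)])]
  have hq : PySem.Chars.findFrom (t ++ ' ' :: v) "@".toList
      (PySem.Chars.find (t ++ ' ' :: v) "://".toList + 3) (some ((t.length : Nat) : Int)) =
      if PySem.Chars.find (t.drop ((PySem.Chars.find t "://".toList).toNat + 3)) "@".toList = -1 then -1
      else (((PySem.Chars.find t "://".toList).toNat + 3 : Nat) : Int) +
        PySem.Chars.find (t.drop ((PySem.Chars.find t "://".toList).toNat + 3)) "@".toList := by
    rw [hfh, hca, pvFindFromTo _ _ _ _ (by omega) (by omega)]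
    rw [List.take_left]
  have hj : PySem.Chars.findFrom t "@".toList (PySem.Chars.find t "://".toList + 3) =
      if PySem.Chars.find (t.drop ((PySem.Chars.find t "://".toList).toNat + 3)) "@".toList = -1 then -1
      else (((PySem.Chars.find t "://".toList).toNat + 3 : Nat) : Int) +
        PySem.Chars.find (t.drop ((PySem.Chars.find t "://".toList).toNat + 3)) "@".toList := by
    rw [hca, PySem.Chars.findFrom_natCast t _ _ hlen]
  have htail : PySem.Chars.slice (t ++ ' ' :: v) (some ((t.length : Nat) : Int)) none = ' ' :: v := by
    rw [PySem.Chars.slice_eq_listSlice, PySem.List.slice_from_natCast, List.drop_left]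
  by_cases hat : PySem.Chars.find (t.drop ((PySem.Chars.find t "://".toList).toNat + 3)) "@".toList = -1
  · rw [if_pos hat] at hq hj
    rw [hq, if_pos rfl, htail, pvSanB_def,
      if_neg (show ¬ PySem.Chars.find t "://".toList = -1 by omega), hj, if_pos rfl]
    rw [PySem.Chars.slice_eq_listSlice, PySem.List.slice_to_natCast, List.take_left]
  · have hfnn : 0 ≤ PySem.Chars.find (t.drop ((PySem.Chars.find t "://".toList).toNat + 3)) "@".toList := by
      have := PySem.Chars.neg_one_le_find (t.drop ((PySem.Chars.find t "://".toList).toNat + 3)) "@".toList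
      omega
    have hfl : (PySem.Chars.find (t.drop ((PySem.Chars.find t "://".toList).toNat + 3)) "@".toList).toNat + 1
        ≤ t.length - ((PySem.Chars.find t "://".toList).toNat + 3) := by
      obtain ⟨hp2, -⟩ := PySem.Chars.find_spec
        (s := t.drop ((PySem.Chars.find t "://".toList).toNat + 3)) (sub := "@".toList) hfnn
      have h1 := hp2.length_le
      rw [List.length_drop, List.length_drop] at h1
      have h3 : ("@".toList).length = 1 := by decide
      omega
    rw [if_neg hat] at hq hj
    have hadd : (((PySem.Chars.find t "://".toList).toNat + 3 : Nat) : Int) +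
        PySem.Chars.find (t.drop ((PySem.Chars.find t "://".toList).toNat + 3)) "@".toList + 1 =
        (((PySem.Chars.find t "://".toList).toNat + 3 +
          ((PySem.Chars.find (t.drop ((PySem.Chars.find t "://".toList).toNat + 3)) "@".toList).toNat + 1) : Nat) : Int) := by
      omega
    rw [hq, if_neg (by omega), htail, pvSanB_def,
      if_neg (show ¬ PySem.Chars.find t "://".toList = -1 by omega), hj, if_neg (by omega)]
    rw [hadd, hfh, hca]
    simp only [PySem.Chars.slice_eq_listSlice, PySem.List.slice_to_natCast, PySem.List.slice_natCast,
      PySem.List.slice_from_natCast]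
    have htk : List.take ((PySem.Chars.find t "://".toList).toNat + 3) (t ++ ' ' :: v) =
        List.take ((PySem.Chars.find t "://".toList).toNat + 3) t := by
      rw [List.take_append, Nat.sub_eq_zero_of_le (by omega), List.take_zero, List.append_nil]
    have hdr : List.drop ((PySem.Chars.find t "://".toList).toNat + 3 +
          ((PySem.Chars.find (t.drop ((PySem.Chars.find t "://".toList).toNat + 3)) "@".toList).toNat + 1)) (t ++ ' ' :: v) =
        List.drop ((PySem.Chars.find t "://".toList).toNat + 3 +
          ((PySem.Chars.find (t.drop ((PySem.Chars.find t "://".toList).toNat + 3)) "@".toList).toNat + 1)) t ++ ' ' :: v := by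
      rw [List.drop_append, Nat.sub_eq_zero_of_le (by omega), List.drop_zero]
    rw [htk, hdr]
    have hseg : List.take (t.length - ((PySem.Chars.find t "://".toList).toNat + 3 +
          ((PySem.Chars.find (t.drop ((PySem.Chars.find t "://".toList).toNat + 3)) "@".toList).toNat + 1)))
        (List.drop ((PySem.Chars.find t "://".toList).toNat + 3 +
          ((PySem.Chars.find (t.drop ((PySem.Chars.find t "://".toList).toNat + 3)) "@".toList).toNat + 1)) t ++ ' ' :: v) =
        List.drop ((PySem.Chars.find t "://".toList).toNat + 3 +
          ((PySem.Chars.find (t.drop ((PySem.Chars.find t "://".toList).toNat + 3)) "@".toList).toNat + 1)) t := by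
      rw [List.take_append, List.take_of_length_le (by rw [List.length_drop]),
        List.length_drop, Nat.sub_self, List.take_zero, List.append_nil]
    rw [hseg]

theorem pvSplit0_go_tok (s : List Char) : ∀ (cur : List Char) (acc : List (List Char)),
    (∀ t ∈ acc, pvTok t) → (∀ c ∈ cur, PySem.Chars.isspace c = false) →
    ∀ t ∈ PySem.Chars.split₀.go s cur acc, pvTok t := by
  induction s with
  | nil =>
    intro cur acc hacc hcur t ht
    simp only [PySem.Chars.split₀.go] at ht
    by_cases hc : cur.isEmpty
    · rw [if_pos hc] at ht
      exact hacc t (by simpa using ht)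
    · rw [if_neg hc] at ht
      simp only [List.mem_reverse, List.mem_cons] at ht
      rcases ht with h | h
      · subst h
        have hcur_ne : cur ≠ [] := by
          cases cur
          · simp at hc
          · simp
        refine ⟨fun hrev => hcur_ne (List.reverse_eq_nil_iff.mp hrev), ?_⟩
        intro c' hc'
        exact hcur c' (List.mem_reverse.mp hc')
      · exact hacc t h
  | cons c rest ih =>
    intro cur acc hacc hcur t ht
    simp only [PySem.Chars.split₀.go] at ht
    by_cases hspc : PySem.Chars.isspace c = true
    · rw [if_pos hspc] at ht
      by_cases hc : cur.isEmpty
      · rw [if_pos hc] at ht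
        exact ih [] acc hacc (by simp) t ht
      · rw [if_neg hc] at ht
        refine ih [] _ ?_ (by simp) t ht
        intro t' ht'
        rcases List.mem_cons.mp ht' with h | h
        · subst h
          have hcur_ne : cur ≠ [] := by
            cases cur
            · simp at hc
            · simp
          refine ⟨fun hrev => hcur_ne (List.reverse_eq_nil_iff.mp hrev), ?_⟩
          intro c' hc'
          exact hcur c' (List.mem_reverse.mp hc')
        · exact hacc t' h
    · rw [if_neg hspc] at ht
      refine ih (c :: cur) acc hacc ?_ t ht
      intro c' hc'
      rcases List.mem_cons.mp hc' with h | h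
      · subst h; simpa using hspc
      · exact hcur c' h

theorem pvSplit0_tok (cs : List Char) : ∀ t ∈ PySem.Chars.split₀ cs, pvTok t := by
  intro t ht
  exact pvSplit0_go_tok cs [] [] (by simp) (by simp) t ht

theorem pvJoinMain : ∀ (toks : List (List Char)), (∀ t ∈ toks, pvTok t) →
    pvGoB (PySem.Chars.join [' '] toks) = PySem.Chars.join [' '] (toks.map pvSanB) := by
  intro toks
  induction toks with
  | nil =>
    intro _
    rw [List.map_nil, PySem.Chars.join_nil, pvGoB_nil]
  | cons t rest ih =>
    intro h
    have htok : pvTok t := h t (by simp)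
    have hrest : ∀ x ∈ rest, pvTok x := fun x hx => h x (by simp [hx])
    cases rest with
    | nil =>
      rw [List.map_cons, List.map_nil, PySem.Chars.join_singleton, PySem.Chars.join_singleton]
      exact pvLast t htok
    | cons r rs =>
      have hjc : PySem.Chars.join [' '] (t :: r :: rs) = t ++ ' ' :: PySem.Chars.join [' '] (r :: rs) := by
        rw [PySem.Chars.join_cons_cons]; simp
      have hjc2 : PySem.Chars.join [' '] ((t :: r :: rs).map pvSanB) =
          pvSanB t ++ ' ' :: PySem.Chars.join [' '] ((r :: rs).map pvSanB) := by
        rw [List.map_cons, List.map_cons, PySem.Chars.join_cons_cons]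
        simp
      rw [hjc, hjc2]
      by_cases hurl : "://".toList <:+: t
      · rw [pvMid t _ htok hurl]
        have hconsSp : pvGoB (' ' :: PySem.Chars.join [' '] (r :: rs)) =
            ' ' :: pvGoB (PySem.Chars.join [' '] (r :: rs)) := by
          have hc := pvCons [] (PySem.Chars.join [' '] (r :: rs)) (by simp)
            (fun hinf => by
              have := List.eq_nil_of_infix_nil hinf
              simp at this)
          simpa using hc
        rw [hconsSp, ih hrest]
      · have hsan : pvSanB t = t := by
          rw [pvSanB_def, if_pos ((PySem.Chars.find_eq_neg_one_iff _ _).mpr hurl)]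
        rw [hsan, pvCons t _ (pvNoSpace t htok.2) hurl, ih hrest]

theorem pvMain (text : String) : strip_url_credentials_py text = strip_url_credentials_py_alt text := by
  simp only [strip_url_credentials_py, strip_url_credentials_py_alt,
    PySem.List.foldl_append_singleton_eq_map, List.nil_append, PySem.Str.join,
    PySem.Str.split₀, List.map_map, Function.comp_def, String.toList_ofList, List.map_id']
  have hsep : " ".toList = [' '] := rfl
  rw [hsep]
  rw [pvJoinMain _ (pvSplit0_tok _)]
  rw [List.map_congr_left (fun t _ => pvSan_eq t)]

-- ===== VERDICT (by name: the statement is the Claim_ definition above) =====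
theorem strip_url_credentials_py_spec : Claim_equal_strip_url_credentials_py := by
  intro text _
  unfold Spec_strip_url_credentials_py
  exact pvMain text
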